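-- pv_equiv track=rewrite | github.com/JesterW365/Clash_Rulesets_Template | Scripts/rulesets_merge/rulesets_merge_tools.py | optimize_domains
-- ===== SOURCE A (Python) =====
-- def optimize_domains(domain_list):
--     """域名去重核心逻辑：+.abc.com 覆盖 *.abc.com"""
--     temp_set = set(domain_list)
--     suffix_roots = set()
--
--     for d in temp_set:
--         if d.startswith('+.'):
--             suffix_roots.add(d[2:].lower())
--
--     final_domains = []
--     for d in sorted(list(temp_set)):
--         if d.startswith('+.'):
--             final_domains.append(d)
--             continue
--
--         check_str = d.lower()
--         if check_str.startswith('*.'):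
--             check_str = check_str[2:]
--
--         parts = check_str.split('.')
--         is_covered = False
--         for i in range(len(parts)):
--             sub_domain = ".".join(parts[i:])
--             if sub_domain in suffix_roots:
--                 is_covered = True
--                 break
--
--         if not is_covered:
--             final_domains.append(d)
--
--     return final_domains
-- ===== SOURCE B (Python) =====
-- def optimize_domains(domain_list):
--     """域名去重核心逻辑：+.abc.com 覆盖 *.abc.com"""
--     suffix_roots = {d[2:].lower() for d in domain_list if d.startswith('+.')}
--
--     def kept(d):
--         if d.startswith('+.'):
--             return True
--         s = d.lower()
--         if s.startswith('*.'):
--             s = s[2:]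
--         return not any(s == r or s.endswith('.' + r) for r in suffix_roots)
--
--     return [d for d in sorted(set(domain_list)) if kept(d)]
-- ===== Notes on version B (the rewrite author's own statement) =====
-- stated objective: alternative
-- what changed: Instead of materializing every dot-suffix of each domain and hash-looking each up in the suffix-root set, B scans the root set once per domain with an equality/endswith('.'+root) test, and builds the result by filtering the sorted dedup list.
import Mathlib
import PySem

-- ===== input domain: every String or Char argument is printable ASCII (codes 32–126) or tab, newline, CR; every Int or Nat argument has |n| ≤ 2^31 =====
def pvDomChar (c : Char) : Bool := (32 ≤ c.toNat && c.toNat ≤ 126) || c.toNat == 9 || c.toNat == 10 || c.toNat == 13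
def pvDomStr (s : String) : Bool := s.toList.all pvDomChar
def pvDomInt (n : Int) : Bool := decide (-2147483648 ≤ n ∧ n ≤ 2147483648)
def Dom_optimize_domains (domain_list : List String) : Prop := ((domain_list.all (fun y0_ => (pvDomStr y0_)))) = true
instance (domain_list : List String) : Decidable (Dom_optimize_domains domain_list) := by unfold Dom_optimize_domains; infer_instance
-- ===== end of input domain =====

-- B replaces A's inner "materialize every dot-suffix of the domain and look each up in the root set"
-- scan by a direct scan over the roots with an endswith test, and builds the result by filtering
-- (objective: alternative).

-- ===== PORT A =====
def optimize_domains (domain_list : List String) : List String :=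
  let temp_set : PySem.Set String := PySem.Set.ofList domain_list
  let suffix_roots : PySem.Set String :=
    temp_set.foldl (fun acc d =>
      if PySem.Str.startswith d "+." then
        PySem.Set.add acc (PySem.Str.lower (PySem.Str.slice d (some 2) none))
      else acc) PySem.Set.empty
  (PySem.List.sorted temp_set (fun x => x) false).foldl (fun final_domains d =>
    if PySem.Str.startswith d "+." then final_domains ++ [d]
    else
      let check_str := PySem.Str.lower d
      let check_str :=
        if PySem.Str.startswith check_str "*." then PySem.Str.slice check_str (some 2) none
        else check_str
      -- sep "." is a nonempty literal, so split? is always `some`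
      let parts := (PySem.Str.split? check_str ".").getD []
      let is_covered := (PySem.List.pyRange 0 (parts.length : Int) 1).any (fun i =>
        PySem.Set.contains suffix_roots (PySem.Str.join "." (PySem.List.slice parts (some i) none)))
      if is_covered then final_domains else final_domains ++ [d]) []

-- ===== PORT B =====
def pvKept (suffix_roots : PySem.Set String) (d : String) : Bool :=
  if PySem.Str.startswith d "+." then true
  else
    let s := PySem.Str.lower d
    let s :=
      if PySem.Str.startswith s "*." then PySem.Str.slice s (some 2) none
      else s
    -- '.' + r is Python string concatenation; exact, done on the code-point list
    ! suffix_roots.any (fun r => s == r || PySem.Str.endswith s (String.ofList ('.' :: r.toList)))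

def optimize_domains_alt (domain_list : List String) : List String :=
  let suffix_roots : PySem.Set String :=
    PySem.Set.ofList ((domain_list.filter (fun d => PySem.Str.startswith d "+.")).map
      (fun d => PySem.Str.lower (PySem.Str.slice d (some 2) none)))
  (PySem.List.sorted (PySem.Set.ofList domain_list) (fun x => x) false).filter
    (pvKept suffix_roots)

-- ===== PRECONDITION & SPEC =====
def Spec_optimize_domains (domain_list : List String) (out : List String) : Prop := out = optimize_domains_alt domain_list
instance (domain_list : List String) (out : List String) : Decidable (Spec_optimize_domains domain_list out) := by unfold Spec_optimize_domains; infer_instance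

-- ===== CLAIM (what is proved, stated in full; the proofs are below) =====
def Claim_equal_optimize_domains : Prop := ∀ (domain_list : List String), Dom_optimize_domains domain_list → Spec_optimize_domains domain_list (optimize_domains domain_list)

-- ===== LEMMAS AND PROOFS =====

-- structural model of Python's str.split('.'), used only in the proofs
def pvSplit (pre : List Char) : List Char → List (List Char)
  | [] => [pre]
  | c :: rest => if c = '.' then pre :: pvSplit [] rest else pvSplit (pre ++ [c]) rest

theorem pvSplit_cons_dot (pre rest) : pvSplit pre ('.' :: rest) = pre :: pvSplit [] rest := by
  simp [pvSplit]

theorem pvSplit_cons_ne {c : Char} (hc : c ≠ '.') (pre rest) :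
    pvSplit pre (c :: rest) = pvSplit (pre ++ [c]) rest := by
  simp [pvSplit, hc]

theorem pvSplit_ne_nil (pre : List Char) (l : List Char) : pvSplit pre l ≠ [] := by
  induction l generalizing pre with
  | nil => simp [pvSplit]
  | cons c rest ih =>
    simp only [pvSplit]
    split_ifs <;> simp [ih]

theorem splitOn_go_eq (fuel : Nat) (l cur : List Char) (acc2 : List (List Char))
    (h : l.length < fuel) :
    PySem.Chars.splitOn.go ['.'] fuel l cur acc2 = acc2.reverse ++ pvSplit cur.reverse l := by
  induction fuel generalizing l cur acc2 with
  | zero => omega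
  | succ fuel ih =>
    cases l with
    | nil => simp [PySem.Chars.splitOn.go, pvSplit]
    | cons c rest =>
      by_cases hc : c = '.'
      · subst hc
        have hp : List.isPrefixOf ['.'] ('.' :: rest) = true := by
          simp [List.isPrefixOf]
        simp only [PySem.Chars.splitOn.go, hp, if_pos]
        rw [show List.drop ['.'].length ('.' :: rest) = rest by simp]
        rw [ih rest [] (cur.reverse :: acc2) (by simpa using Nat.lt_of_succ_lt_succ h)]
        rw [pvSplit_cons_dot]
        simp
      · have hp : List.isPrefixOf ['.'] (c :: rest) = false := by
          simp [List.isPrefixOf]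
          exact fun hh => (hc hh.symm).elim
        simp only [PySem.Chars.splitOn.go, hp, Bool.false_eq_true, if_false]
        rw [ih rest (c :: cur) acc2 (by simpa using Nat.lt_of_succ_lt_succ h)]
        rw [pvSplit_cons_ne hc]
        simp

theorem splitOn_eq_pvSplit (cs : List Char) :
    PySem.Chars.splitOn cs ['.'] = pvSplit [] cs := by
  unfold PySem.Chars.splitOn
  rw [splitOn_go_eq (cs.length + 1) cs [] [] (by omega)]
  simp

theorem join_pvSplit (l : List Char) (pre : List Char) :
    PySem.Chars.join ['.'] (pvSplit pre l) = pre ++ l := by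
  induction l generalizing pre with
  | nil => simp [pvSplit, PySem.Chars.join_singleton]
  | cons c rest ih =>
    by_cases hc : c = '.'
    · subst hc
      rw [pvSplit_cons_dot]
      obtain ⟨m, M, hm⟩ : ∃ m M, pvSplit ([] : List Char) rest = m :: M := by
        cases hh : pvSplit ([] : List Char) rest with
        | nil => exact absurd hh (pvSplit_ne_nil _ _)
        | cons m M => exact ⟨m, M, rfl⟩
      rw [hm, PySem.Chars.join_cons_cons ['.'] pre m M, ← hm, ih []]
      simp
    · rw [pvSplit_cons_ne hc, ih (pre ++ [c])]
      simp

theorem pvSplit_suffix (l : List Char) (pre r : List Char) :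
    (∃ i, i < (pvSplit pre l).length ∧ PySem.Chars.join ['.'] ((pvSplit pre l).drop i) = r)
    ↔ (r = pre ++ l ∨ ('.' :: r) <:+ l) := by
  induction l generalizing pre with
  | nil =>
    simp only [pvSplit]
    constructor
    · rintro ⟨i, hi, hj⟩
      have hi0 : i = 0 := by simp at hi; omega
      subst hi0
      left
      simpa [PySem.Chars.join_singleton] using hj.symm
    · rintro (h | h)
      · exact ⟨0, by simp, by simp [PySem.Chars.join_singleton, h]⟩
      · simp at h
  | cons c rest ih =>
    by_cases hc : c = '.'
    · subst hc
      rw [pvSplit_cons_dot]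
      obtain ⟨m, M, hm⟩ : ∃ m M, pvSplit ([] : List Char) rest = m :: M := by
        cases hh : pvSplit ([] : List Char) rest with
        | nil => exact absurd hh (pvSplit_ne_nil _ _)
        | cons m M => exact ⟨m, M, rfl⟩
      have hjoin : PySem.Chars.join ['.'] (pre :: pvSplit ([] : List Char) rest)
          = pre ++ '.' :: rest := by
        rw [hm, PySem.Chars.join_cons_cons ['.'] pre m M, ← hm, join_pvSplit rest []]
        simp
      constructor
      · rintro ⟨i, hi, hj⟩
        cases i with
        | zero =>
          left
          rw [List.drop_zero, hjoin] at hj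
          exact hj.symm
        | succ j =>
          right
          rw [List.suffix_cons_iff]
          have := (ih []).mp ⟨j, by simpa using hi, by simpa using hj⟩
          rcases this with h | h
          · left; simp [h]
          · right; exact h
      · rintro (h | h)
        · exact ⟨0, by simp, by rw [List.drop_zero, hjoin]; exact h.symm⟩
        · rw [List.suffix_cons_iff] at h
          rcases h with h | h
          · have hr : r = rest := by simpa using h
            obtain ⟨j, hj', hjj⟩ := (ih []).mpr (Or.inl (by simp [hr]))
            exact ⟨j + 1, by simpa using hj', by simpa using hjj⟩
          · obtain ⟨j, hj', hjj⟩ := (ih []).mpr (Or.inr h)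
            exact ⟨j + 1, by simpa using hj', by simpa using hjj⟩
    · rw [pvSplit_cons_ne hc, ih (pre ++ [c])]
      constructor
      · rintro (h | h)
        · left; simp [h]
        · right; rw [List.suffix_cons_iff]; right; exact h
      · rintro (h | h)
        · left; simpa using h
        · right
          rw [List.suffix_cons_iff] at h
          rcases h with h | h
          · have : '.' = c := by simpa using congrArg (List.head? ·) h
            exact absurd this.symm hc
          · exact h

theorem pyRange_zero_nat (n : Nat) :
    PySem.List.pyRange 0 (n : Int) 1 = (List.range n).map (fun k => (k : Int)) := by
  unfold PySem.List.pyRange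
  rcases Nat.eq_zero_or_pos n with h | h
  · subst h; simp
  · have h1 : (0:Int) < n := by exact_mod_cast h
    simp [h, List.map_eq_flatMap]

theorem mem_pyRange_zero_nat (n : Nat) (i : Int) :
    i ∈ PySem.List.pyRange 0 (n : Int) 1 ↔ ∃ k : Nat, k < n ∧ (k : Int) = i := by
  rw [pyRange_zero_nat]
  simp
  constructor
  · rintro ⟨k, hk, rfl⟩; exact ⟨k, hk, rfl⟩
  · rintro ⟨k, hk, rfl⟩; exact ⟨k, hk, rfl⟩

-- the suffixes A materializes are exactly { r | r = s or s ends with "." + r }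
theorem str_suffix_iff (s r : String) :
    (∃ k, k < (((PySem.Str.split? s ".").getD []).length) ∧
        PySem.Str.join "." (((PySem.Str.split? s ".").getD []).drop k) = r)
    ↔ (s = r ∨ PySem.Str.endswith s (String.ofList ('.' :: r.toList)) = true) := by
  obtain ⟨P, hP⟩ : ∃ P, PySem.Str.split? s "." = some P := by
    cases hh : PySem.Str.split? s "." with
    | none =>
      exfalso
      have := PySem.Str.split?_map s "."
      rw [hh] at this
      simp [PySem.Chars.split?] at this
    | some P => exact ⟨P, rfl⟩
  have hPl : P.map String.toList = pvSplit [] s.toList := by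
    have := PySem.Str.split?_map s "."
    rw [hP] at this
    simp only [PySem.Chars.split?] at this
    rw [← splitOn_eq_pvSplit]
    simpa using this
  rw [hP]
  simp only [Option.getD_some]
  have hlen : P.length = (pvSplit [] s.toList).length := by
    rw [← hPl]; simp
  constructor
  · rintro ⟨k, hk, hj⟩
    have hcl : PySem.Chars.join ['.'] ((pvSplit [] s.toList).drop k) = r.toList := by
      rw [← hPl, ← List.map_drop]
      have := congrArg String.toList hj
      rwa [PySem.Str.toList_join] at this
    have := (pvSplit_suffix s.toList [] r.toList).mp ⟨k, by omega, hcl⟩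
    rcases this with h | h
    · left
      exact (String.toList_inj.mp (by simpa using h)).symm
    · right
      rw [PySem.Str.endswith_eq, String.toList_ofList, PySem.Chars.endswith_iff]
      exact h
  · rintro (h | h)
    · obtain ⟨k, hk, hj⟩ := (pvSplit_suffix s.toList [] r.toList).mpr (Or.inl (by simp [h]))
      refine ⟨k, by omega, ?_⟩
      apply String.toList_inj.mp
      rw [PySem.Str.toList_join, List.map_drop, hPl]
      exact hj
    · rw [PySem.Str.endswith_eq, String.toList_ofList, PySem.Chars.endswith_iff] at h
      obtain ⟨k, hk, hj⟩ := (pvSplit_suffix s.toList [] r.toList).mpr (Or.inr h)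
      refine ⟨k, by omega, ?_⟩
      apply String.toList_inj.mp
      rw [PySem.Str.toList_join, List.map_drop, hPl]
      exact hj

-- A's per-element decision, named
def pvKeptA (roots : PySem.Set String) (d : String) : Bool :=
  if PySem.Str.startswith d "+." then true
  else
    let check_str := PySem.Str.lower d
    let check_str :=
      if PySem.Str.startswith check_str "*." then PySem.Str.slice check_str (some 2) none
      else check_str
    let parts := (PySem.Str.split? check_str ".").getD []
    ! (PySem.List.pyRange 0 (parts.length : Int) 1).any (fun i =>
      PySem.Set.contains roots (PySem.Str.join "." (PySem.List.slice parts (some i) none)))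

theorem pvIfNot {α : Type} (c : Bool) (a b : α) :
    (if c = true then a else b) = if (!c) = true then b else a := by
  cases c <;> simp

theorem A_loop_eq (roots : PySem.Set String) (l : List String) (acc : List String) :
    l.foldl (fun final_domains d =>
      if PySem.Str.startswith d "+." then final_domains ++ [d]
      else
        let check_str := PySem.Str.lower d
        let check_str :=
          if PySem.Str.startswith check_str "*." then PySem.Str.slice check_str (some 2) none
          else check_str
        let parts := (PySem.Str.split? check_str ".").getD []
        let is_covered := (PySem.List.pyRange 0 (parts.length : Int) 1).any (fun i =>
          PySem.Set.contains roots (PySem.Str.join "." (PySem.List.slice parts (some i) none)))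
        if is_covered then final_domains else final_domains ++ [d]) acc
    = acc ++ l.filter (pvKeptA roots) := by
  induction l generalizing acc with
  | nil => simp
  | cons d rest ih =>
    rw [List.foldl_cons, List.filter_cons, ih]
    by_cases h1 : PySem.Str.startswith d "+." = true
    · rw [if_pos h1]
      rw [show pvKeptA roots d = true by unfold pvKeptA; rw [if_pos h1]]
      simp
    · rw [if_neg h1]
      dsimp only
      rw [show pvKeptA roots d
          = ! (PySem.List.pyRange 0
              ((((PySem.Str.split? (if PySem.Str.startswith (PySem.Str.lower d) "*."
                  then PySem.Str.slice (PySem.Str.lower d) (some 2) none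
                  else PySem.Str.lower d) ".").getD []).length : Int)) 1).any (fun i =>
              PySem.Set.contains roots (PySem.Str.join "." (PySem.List.slice
                ((PySem.Str.split? (if PySem.Str.startswith (PySem.Str.lower d) "*."
                  then PySem.Str.slice (PySem.Str.lower d) (some 2) none
                  else PySem.Str.lower d) ".").getD []) (some i) none)))
        by unfold pvKeptA; rw [if_neg h1]]
      rw [pvIfNot]
      split_ifs <;> simp

theorem mem_foldl_add_if (p : String → Bool) (f : String → String)
    (l : List String) (acc : PySem.Set String) (x : String) :
    x ∈ l.foldl (fun acc d => if p d then PySem.Set.add acc (f d) else acc) acc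
    ↔ x ∈ acc ∨ ∃ d ∈ l, p d = true ∧ x = f d := by
  induction l generalizing acc with
  | nil => simp
  | cons d rest ih =>
    rw [List.foldl_cons]
    by_cases h : p d = true
    · rw [if_pos h, ih]
      rw [PySem.Set.mem_add]
      constructor
      · rintro (⟨h1 | h1⟩ | h1)
        · exact Or.inl h1
        · exact Or.inr ⟨d, by simp, h, h1⟩
        · obtain ⟨e, he, hpe, hx⟩ := h1
          exact Or.inr ⟨e, by simp [he], hpe, hx⟩
      · rintro (h1 | ⟨e, he, hpe, hx⟩)
        · exact Or.inl (Or.inl h1)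
        · rcases List.mem_cons.mp he with rfl | he'
          · exact Or.inl (Or.inr hx)
          · exact Or.inr ⟨e, he', hpe, hx⟩
    · rw [if_neg h, ih]
      constructor
      · rintro (h1 | ⟨e, he, hpe, hx⟩)
        · exact Or.inl h1
        · exact Or.inr ⟨e, by simp [he], hpe, hx⟩
      · rintro (h1 | ⟨e, he, hpe, hx⟩)
        · exact Or.inl h1
        · rcases List.mem_cons.mp he with rfl | he'
          · exact absurd hpe h
          · exact Or.inr ⟨e, he', hpe, hx⟩

theorem covered_eq (roots1 roots2 : PySem.Set String)
    (hmem : ∀ x, x ∈ roots1 ↔ x ∈ roots2) (s : String) :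
    (PySem.List.pyRange 0 ((((PySem.Str.split? s ".").getD []).length : Int)) 1).any (fun i =>
        PySem.Set.contains roots1 (PySem.Str.join "."
          (PySem.List.slice ((PySem.Str.split? s ".").getD []) (some i) none)))
    = roots2.any (fun r => s == r ||
        PySem.Str.endswith s (String.ofList ('.' :: r.toList))) := by
  rw [Bool.eq_iff_iff, List.any_eq_true, List.any_eq_true]
  constructor
  · rintro ⟨i, hi, hc⟩
    obtain ⟨k, hk, rfl⟩ := (mem_pyRange_zero_nat _ i).mp hi
    rw [PySem.List.slice_from _ (by exact_mod_cast Nat.zero_le k)] at hc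
    rw [PySem.Set.contains_iff] at hc
    simp only [Int.toNat_natCast] at hc
    have hsub := (str_suffix_iff s _).mp ⟨k, hk, rfl⟩
    refine ⟨_, (hmem _).mp hc, ?_⟩
    rcases hsub with h | h
    · exact Bool.or_eq_true_iff.mpr (Or.inl (beq_iff_eq.mpr h))
    · exact Bool.or_eq_true_iff.mpr (Or.inr h)
  · rintro ⟨r, hrmem, hrp⟩
    have hd : s = r ∨ PySem.Str.endswith s (String.ofList ('.' :: r.toList)) = true := by
      rcases Bool.or_eq_true_iff.mp hrp with h | h
      · exact Or.inl (by simpa using h)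
      · exact Or.inr h
    obtain ⟨k, hk, hj⟩ := (str_suffix_iff s r).mpr hd
    refine ⟨(k : Int), (mem_pyRange_zero_nat _ _).mpr ⟨k, hk, rfl⟩, ?_⟩
    · rw [PySem.List.slice_from _ (by exact_mod_cast Nat.zero_le k)]
      simp only [Int.toNat_natCast]
      rw [PySem.Set.contains_iff, hj]
      exact (hmem r).mpr hrmem

set_option maxHeartbeats 1000000 in
theorem kept_eq (roots1 roots2 : PySem.Set String)
    (hmem : ∀ x, x ∈ roots1 ↔ x ∈ roots2) (d : String) :
    pvKeptA roots1 d = pvKept roots2 d := by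
  unfold pvKeptA pvKept
  by_cases h1 : PySem.Str.startswith d "+." = true
  · rw [if_pos h1, if_pos h1]
  · rw [if_neg h1, if_neg h1]
    dsimp only
    exact congrArg (fun z => !z) (covered_eq roots1 roots2 hmem _)

-- ===== VERDICT (by name: the statement is the Claim_ definition above) =====
theorem optimize_domains_spec : Claim_equal_optimize_domains := by
  intro dl _
  unfold Spec_optimize_domains optimize_domains optimize_domains_alt
  dsimp only
  rw [A_loop_eq, List.nil_append]
  apply List.filter_congr
  intro d _
  apply kept_eq
  intro x
  rw [mem_foldl_add_if]
  simp only [PySem.Set.mem_ofList, List.mem_map, List.mem_filter]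
  constructor
  · rintro (h | ⟨e, he, hpe, hx⟩)
    · simp [PySem.Set.empty] at h
    · exact ⟨e, ⟨he, hpe⟩, hx.symm⟩
  · rintro ⟨e, ⟨he, hpe⟩, hx⟩
    exact Or.inr ⟨e, he, hpe, hx.symm⟩
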